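-- pv_equiv track=rewrite | github.com/zwiadowca987/Informatyka-Zadania | ZADANIA/Algorytmy/Algorytmy na liczbach całkowitych/Suma cyfr binarnie.py | suma_bin
-- ===== SOURCE A (Python) =====
-- def suma_bin(z):
--     s = 0
--     i = z
--
--     while i >= 0:
--         s += z % 2
--         z = z // 2
--         i -= 1
--
--     return s
-- ===== SOURCE B (Python) =====
-- def suma_bin(z):
--     s = 0
--     while z > 0:
--         z &= z - 1
--         s += 1
--     return s
-- ===== Notes on version B (the rewrite author's own statement) =====
-- stated objective: faster
-- what changed: Replaced A's countdown loop that runs z+1 iterations (halving z each time) with Brian Kernighan's bit trick (z &= z-1 once per set bit), so the loop runs popcount(z) times instead of z+1 times.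
import Mathlib
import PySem

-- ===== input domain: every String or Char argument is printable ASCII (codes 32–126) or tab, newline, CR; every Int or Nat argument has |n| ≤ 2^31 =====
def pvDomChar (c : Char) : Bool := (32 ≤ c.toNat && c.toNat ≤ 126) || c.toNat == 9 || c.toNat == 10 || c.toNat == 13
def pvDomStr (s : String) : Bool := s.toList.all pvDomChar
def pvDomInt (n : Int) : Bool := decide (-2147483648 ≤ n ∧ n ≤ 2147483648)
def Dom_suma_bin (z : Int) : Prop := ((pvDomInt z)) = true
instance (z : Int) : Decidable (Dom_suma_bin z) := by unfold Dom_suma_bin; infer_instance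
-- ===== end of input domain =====

-- B replaces A's countdown loop (z+1 iterations) by Kernighan's z &= z-1 (one iteration per set bit).

-- ===== PORT A =====
-- while i >= 0: s += z % 2; z //= 2; i -= 1
def sumaLoop (s z i : Int) : Int :=
  if 0 ≤ i then sumaLoop (s + PySem.Int.mod z 2) (PySem.Int.floordiv z 2) (i - 1) else s
termination_by (i + 1).toNat
decreasing_by omega

def suma_bin (z : Int) : Int := sumaLoop 0 z z

-- ===== PORT B =====
theorem kern_band_lt (z : Int) (h : 0 < z) : (PySem.Int.band z (z - 1)).toNat < z.toNat := by
  rw [PySem.Int.band_of_nonneg (by omega) (by omega)]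
  have h1 : z.toNat &&& (z - 1).toNat ≤ (z - 1).toNat := Nat.and_le_right
  omega

-- while z > 0: z &= z - 1; s += 1
def kernLoop (z s : Int) : Int :=
  if 0 < z then kernLoop (PySem.Int.band z (z - 1)) (s + 1) else s
termination_by z.toNat
decreasing_by exact kern_band_lt _ (by assumption)

def suma_bin_alt (z : Int) : Int := kernLoop z 0

-- ===== PRECONDITION & SPEC =====
def Spec_suma_bin (z : Int) (out : Int) : Prop := out = suma_bin_alt z
instance (z : Int) (out : Int) : Decidable (Spec_suma_bin z out) := by unfold Spec_suma_bin; infer_instance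

-- ===== CLAIM (what is proved, stated in full; the proofs are below) =====
def Claim_equal_suma_bin : Prop := ∀ (z : Int), Dom_suma_bin z → Spec_suma_bin z (suma_bin z)

-- ===== LEMMAS AND PROOFS =====

-- popcount spec, on Nat via PySem's bitCount
def N (n : Nat) : Nat := PySem.Int.bitCount (n : Int)

theorem N_zero : N 0 = 0 := rfl

theorem N_step (m : Nat) (h : 0 < m) : N m = m % 2 + N (m / 2) := by
  simpa [N] using PySem.Int.bitCount_natCast h

-- A's loop computes s + popcount(z) once i is large enough (z < 2^(i+1))
theorem sumaLoop_eq (k : Nat) : ∀ (s : Int) (n : Nat) (i : Int), i.toNat = k → 0 ≤ i →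
    n < 2 ^ (i.toNat + 1) → sumaLoop s (n : Int) i = s + (N n : Int) := by
  induction k with
  | zero =>
    intro s n i hk hi hlt
    have hi0 : i = 0 := by omega
    subst hi0
    have hn : n < 2 := by simpa using hlt
    interval_cases n <;>
      (simp [sumaLoop, N, PySem.Int.mod, PySem.Int.floordiv]; try rfl)
  | succ k ih =>
    intro s n i hk hi hlt
    rw [sumaLoop, if_pos hi]
    have hmod : PySem.Int.mod (n : Int) 2 = ((n % 2 : Nat) : Int) := by
      exact_mod_cast PySem.Int.mod_natCast n 2
    have hdiv : PySem.Int.floordiv (n : Int) 2 = ((n / 2 : Nat) : Int) := by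
      exact_mod_cast PySem.Int.floordiv_natCast n 2
    rw [hmod, hdiv, ih _ (n / 2) (i - 1) (by omega) (by omega) (by
      have : (i - 1).toNat + 1 = i.toNat := by omega
      rw [this]
      have h2 : 2 ^ i.toNat + 2 ^ i.toNat = 2 ^ (i.toNat + 1) := by ring
      omega)]
    rcases Nat.eq_zero_or_pos n with h0 | hpos
    · subst h0; simp [N_zero]
    · rw [N_step n hpos]; push_cast; ring

-- bit facts for Kernighan's step
theorem land_odd (n : Nat) (h : n % 2 = 1) : n &&& (n - 1) = n - 1 := by
  apply Nat.eq_of_testBit_eq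
  intro i
  rw [Nat.testBit_land]
  cases i with
  | zero =>
    simp [Nat.testBit_zero, h]
  | succ j =>
    have hd : (n - 1) / 2 = n / 2 := by omega
    rw [Nat.testBit_add_one, Nat.testBit_add_one, hd, Bool.and_self]

theorem land_even (n : Nat) (h : n % 2 = 0) (hp : 0 < n) :
    n &&& (n - 1) = 2 * ((n / 2) &&& (n / 2 - 1)) := by
  apply Nat.eq_of_testBit_eq
  intro i
  rw [Nat.testBit_land]
  cases i with
  | zero =>
    simp [Nat.testBit_zero, h, Nat.mul_mod_right]
  | succ j =>
    have hd : (n - 1) / 2 = n / 2 - 1 := by omega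
    have hd2 : 2 * (n / 2 &&& (n / 2 - 1)) / 2 = n / 2 &&& (n / 2 - 1) := by omega
    rw [Nat.testBit_add_one, Nat.testBit_add_one, Nat.testBit_add_one, hd, hd2,
      Nat.testBit_land]

theorem N_kern : ∀ n : Nat, 0 < n → N (n &&& (n - 1)) + 1 = N n := by
  intro n
  induction n using Nat.strong_induction_on with
  | _ n ih =>
    intro hp
    rcases Nat.even_or_odd n with he | ho
    · have h2 : n % 2 = 0 := Nat.even_iff.mp he
      have hhalf : 0 < n / 2 := by omega
      rw [land_even n h2 hp, N_step n hp, h2]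
      rcases Nat.eq_zero_or_pos (n / 2 &&& (n / 2 - 1)) with hz | hz
      · have hih := ih (n / 2) (by omega) hhalf
        rw [hz] at hih
        rw [hz]
        simpa [N_zero] using hih
      · have hstep := N_step (2 * (n / 2 &&& (n / 2 - 1))) (by omega)
        rw [hstep, Nat.mul_mod_right, Nat.mul_div_cancel_left _ (by norm_num : 0 < 2)]
        have := ih (n / 2) (by omega) hhalf
        omega
    · have h2 : n % 2 = 1 := Nat.odd_iff.mp ho
      rw [land_odd n h2, N_step n hp, h2]
      rcases Nat.eq_zero_or_pos (n - 1) with hz | hz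
      · have : n = 1 := by omega
        subst this
        decide
      · rw [N_step (n - 1) hz]
        have hm : (n - 1) % 2 = 0 := by omega
        have hd : (n - 1) / 2 = n / 2 := by omega
        rw [hm, hd]
        omega

theorem kernLoop_eq (k : Nat) : ∀ (n : Nat) (s : Int), n = k →
    kernLoop (n : Int) s = s + (N n : Int) := by
  induction k using Nat.strong_induction_on with
  | _ k ih =>
    intro n s hk
    subst hk
    rcases Nat.eq_zero_or_pos n with h0 | hp
    · subst h0; rw [kernLoop]; simp [N_zero]
    · rw [kernLoop, if_pos (by exact_mod_cast hp)]
      have hb : PySem.Int.band (n : Int) ((n : Int) - 1) = ((n &&& (n - 1) : Nat) : Int) := by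
        rw [PySem.Int.band_of_nonneg (by omega) (by omega)]
        rw [show ((n : Int)).toNat = n by omega, show ((n : Int) - 1).toNat = n - 1 by omega]
      rw [hb, ih (n &&& (n - 1)) (by
          have := Nat.and_le_right (n := n) (m := n - 1)
          omega) (n &&& (n - 1)) (s + 1) rfl]
      have := N_kern n hp
      omega

-- ===== VERDICT (by name: the statement is the Claim_ definition above) =====
theorem suma_bin_spec : Claim_equal_suma_bin := by
  intro z _
  unfold Spec_suma_bin suma_bin suma_bin_alt
  rcases lt_or_ge z 0 with hneg | hpos
  · rw [sumaLoop, if_neg (by omega), kernLoop, if_neg (by omega)]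
  · have hz : z = (z.toNat : Int) := by omega
    rw [hz, sumaLoop_eq z.toNat 0 z.toNat (z.toNat : Int) (by omega) (by positivity)
      (by
        have h1 : z.toNat < 2 ^ z.toNat := Nat.lt_two_pow_self
        have h2 : (2:Nat) ^ z.toNat ≤ 2 ^ (((z.toNat : Int)).toNat + 1) := by
          apply Nat.pow_le_pow_right <;> omega
        omega),
      kernLoop_eq z.toNat z.toNat 0 rfl]
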